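-- pv_equiv track=rewrite | github.com/himanshubabal/NPS-vs-UPS | pension.py | get_full_pension_amt_UPS
-- ===== SOURCE A (Python) =====
-- def get_full_pension_amt_UPS(monthly_salary_detailed:dict):
--     # Step 1: Flatten and filter non-zero
--     monthly_salaries = [
--         monthly_salary_detailed[year][month]
--         for year in sorted(monthly_salary_detailed)
--         for month in range(1, 13)
--         if month in monthly_salary_detailed[year] and monthly_salary_detailed[year][month] > 0
--         ]
--
--     # Step 2: Take last 12 non-zero months
--     last_12_month_salary = monthly_salaries[-12:]
--
--     # Step 3: Calculate average
--     pension_average_last_12_mnth = int(sum(last_12_month_salary) / len(last_12_month_salary))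
--
--     return pension_average_last_12_mnth
-- ===== SOURCE B (Python) =====
-- def get_full_pension_amt_UPS(monthly_salary_detailed: dict):
--     # Reverse scan: newest year/month first, stop as soon as 12 non-zero salaries are in hand.
--     buffer = []
--     for year in sorted(monthly_salary_detailed, reverse=True):
--         months = monthly_salary_detailed[year]
--         for month in range(12, 0, -1):
--             if month in months and months[month] > 0:
--                 buffer.append(months[month])
--                 if len(buffer) == 12:
--                     return int(sum(buffer) / len(buffer))
--     return int(sum(buffer) / len(buffer))
-- ===== Notes on version B (the rewrite author's own statement) =====
-- stated objective: faster
-- what changed: B replaces A's flatten-everything-then-slice[-12:] with an early-terminating reverse scan (years descending, months 12..1) that returns as soon as 12 non-zero salaries are collected; the average of the reversed buffer equals A's average of the last-12 slice.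
import Mathlib
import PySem

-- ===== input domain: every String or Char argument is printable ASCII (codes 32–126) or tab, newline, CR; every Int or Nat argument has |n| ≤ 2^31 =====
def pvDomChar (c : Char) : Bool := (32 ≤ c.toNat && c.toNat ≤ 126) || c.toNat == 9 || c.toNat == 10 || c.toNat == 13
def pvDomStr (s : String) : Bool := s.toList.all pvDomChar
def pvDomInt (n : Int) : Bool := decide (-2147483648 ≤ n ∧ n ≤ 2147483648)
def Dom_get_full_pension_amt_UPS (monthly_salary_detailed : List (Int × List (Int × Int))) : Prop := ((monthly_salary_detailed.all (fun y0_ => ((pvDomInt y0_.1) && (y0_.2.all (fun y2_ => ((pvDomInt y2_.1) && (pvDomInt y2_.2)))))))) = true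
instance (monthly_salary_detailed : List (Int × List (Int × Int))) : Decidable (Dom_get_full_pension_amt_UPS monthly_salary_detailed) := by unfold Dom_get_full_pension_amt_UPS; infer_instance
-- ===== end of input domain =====

-- B replaces A's full flatten-then-slice[-12:] with an early-terminating reverse scan
-- (newest year, months 12..1) that stops as soon as 12 non-zero salaries are collected.

-- ===== PORT A =====
-- one year's comprehension row: values of months 1..12 present with salary > 0, ascending
def pvAYearRow (yd : PySem.Dict Int Int) : List Int :=
  ((PySem.List.pyRange 1 13 1).filter
      (fun month => yd.contains month && decide (0 < yd.getD month 0))).map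
    (fun month => yd.getD month 0)

def get_full_pension_amt_UPS (monthly_salary_detailed : List (Int × List (Int × Int))) : Int :=
  let d : PySem.Dict Int (PySem.Dict Int Int) :=
    PySem.Dict.ofList (monthly_salary_detailed.map (fun p => (p.1, PySem.Dict.ofList p.2)))
  let monthly_salaries :=
    (PySem.List.sorted d.keys (fun y => y) false).flatMap
      (fun year => pvAYearRow (d.getD year PySem.Dict.empty))
  let last_12_month_salary := PySem.List.slice monthly_salaries (some (-12)) none
  -- int(sum/len): Python's float division is exact enough here (0 ≤ sum < 2^53, 1 ≤ len ≤ 12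
  -- on Dom ∩ Pre_, fractional part ≥ 1/12 when non-integral), so it equals floor division
  PySem.Int.floordiv last_12_month_salary.sum (last_12_month_salary.length : Int)

-- ===== PORT B =====
-- inner month loop: append each non-zero salary, flag=true signals early return at 12
def pvBMonthLoop (months : PySem.Dict Int Int) (ms : List Int) (buffer : List Int) :
    List Int × Bool :=
  match ms with
  | [] => (buffer, false)
  | m :: rest =>
    if months.contains m && decide (0 < months.getD m 0) then
      let buffer' := buffer ++ [months.getD m 0]
      if buffer'.length = 12 then (buffer', true)
      else pvBMonthLoop months rest buffer'
    else pvBMonthLoop months rest buffer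

def pvBYearLoop (d : PySem.Dict Int (PySem.Dict Int Int)) (years : List Int)
    (buffer : List Int) : List Int :=
  match years with
  | [] => buffer
  | y :: rest =>
    let r := pvBMonthLoop (d.getD y PySem.Dict.empty) (PySem.List.pyRange 12 0 (-1)) buffer
    if r.2 then r.1 else pvBYearLoop d rest r.1

def get_full_pension_amt_UPS_alt (monthly_salary_detailed : List (Int × List (Int × Int))) : Int :=
  let d : PySem.Dict Int (PySem.Dict Int Int) :=
    PySem.Dict.ofList (monthly_salary_detailed.map (fun p => (p.1, PySem.Dict.ofList p.2)))
  let buffer := pvBYearLoop d (PySem.List.sorted d.keys (fun y => y) true) []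
  -- int(sum/len): same exact-float remark as in port A
  PySem.Int.floordiv buffer.sum (buffer.length : Int)

-- ===== PRECONDITION & SPEC =====
-- Pre_ excludes exactly the inputs whose dict holds no month 1..12 with a positive salary:
-- there Python A raises ZeroDivisionError (len of the averaged list is 0).
def Pre_get_full_pension_amt_UPS (monthly_salary_detailed : List (Int × List (Int × Int))) : Prop :=
  ∃ p ∈ (PySem.Dict.ofList (monthly_salary_detailed.map
          (fun q => (q.1, (PySem.Dict.ofList q.2 : PySem.Dict Int Int))))).items,
    ∃ m ∈ PySem.List.pyRange 1 13 1, 0 < p.2.getD m 0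
instance (monthly_salary_detailed : List (Int × List (Int × Int))) : Decidable (Pre_get_full_pension_amt_UPS monthly_salary_detailed) := by unfold Pre_get_full_pension_amt_UPS; infer_instance

def pvWitness_get_full_pension_amt_UPS : (List (Int × List (Int × Int))) := [(2020, [(1, 100)])]

def Spec_get_full_pension_amt_UPS (monthly_salary_detailed : List (Int × List (Int × Int))) (out : Int) : Prop := out = get_full_pension_amt_UPS_alt monthly_salary_detailed
instance (monthly_salary_detailed : List (Int × List (Int × Int))) (out : Int) : Decidable (Spec_get_full_pension_amt_UPS monthly_salary_detailed out) := by unfold Spec_get_full_pension_amt_UPS; infer_instance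

-- ===== CLAIM (what is proved, stated in full; the proofs are below) =====
def Claim_equal_get_full_pension_amt_UPS : Prop := ∀ (monthly_salary_detailed : List (Int × List (Int × Int))), Dom_get_full_pension_amt_UPS monthly_salary_detailed → Pre_get_full_pension_amt_UPS monthly_salary_detailed → Spec_get_full_pension_amt_UPS monthly_salary_detailed (get_full_pension_amt_UPS monthly_salary_detailed)

-- ===== LEMMAS AND PROOFS =====

-- the descending month scan of one year collects exactly the reverse of A's row
lemma pvRowDesc (yd : PySem.Dict Int Int) :
    ((PySem.List.pyRange 12 0 (-1)).filter
        (fun m => yd.contains m && decide (0 < yd.getD m 0))).map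
      (fun m => yd.getD m 0) = (pvAYearRow yd).reverse := by
  have h : PySem.List.pyRange 12 0 (-1) = (PySem.List.pyRange 1 13 1).reverse := by decide
  simp [pvAYearRow, h, List.filter_reverse, List.map_reverse]

-- the inner loop is "append the filtered row, truncated at total length 12"
lemma pvBMonthLoop_eq (yd : PySem.Dict Int Int) (ms : List Int) (buffer : List Int)
    (h : buffer.length < 12) :
    pvBMonthLoop yd ms buffer =
      (let f := (ms.filter (fun m => yd.contains m && decide (0 < yd.getD m 0))).map
          (fun m => yd.getD m 0);
       if 12 ≤ buffer.length + f.length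
       then (buffer ++ f.take (12 - buffer.length), true)
       else (buffer ++ f, false)) := by
  induction ms generalizing buffer with
  | nil => simp [pvBMonthLoop]; omega
  | cons m rest ih =>
    simp only [pvBMonthLoop, List.filter_cons]
    by_cases hc : (yd.contains m && decide (0 < yd.getD m 0)) = true
    · simp only [hc, if_true, List.map_cons, List.length_append, List.length_cons, List.length_nil]
      by_cases h12 : buffer.length + 1 = 12
      · rw [if_pos h12, if_pos (by omega)]
        have h1 : 12 - buffer.length = 1 := by omega
        simp [h1]
      · rw [if_neg h12, ih _ (by simp; omega)]
        simp only [List.length_append, List.length_cons, List.length_nil]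
        by_cases h2 : 12 ≤ buffer.length + 1 + ((rest.filter
            (fun m => yd.contains m && decide (0 < yd.getD m 0))).map
              (fun m => yd.getD m 0)).length
        · rw [if_pos (by omega), if_pos (by omega)]
          have h1 : 12 - buffer.length = (12 - (buffer.length + 1)) + 1 := by omega
          rw [h1, List.take_succ_cons]
          simp
        · rw [if_neg (by omega), if_neg (by omega)]
          simp
    · simp only [hc, Bool.false_eq_true, if_false]
      exact ih _ h

-- the year loop is the same statement for the concatenation of the per-year reversed rows
lemma pvBYearLoop_eq (d : PySem.Dict Int (PySem.Dict Int Int)) (years : List Int)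
    (buffer : List Int) (h : buffer.length < 12) :
    pvBYearLoop d years buffer =
      (let g := years.flatMap (fun y => (pvAYearRow (d.getD y PySem.Dict.empty)).reverse);
       if 12 ≤ buffer.length + g.length
       then buffer ++ g.take (12 - buffer.length)
       else buffer ++ g) := by
  induction years generalizing buffer with
  | nil => simp [pvBYearLoop]
  | cons y rest ih =>
    simp only [pvBYearLoop, pvBMonthLoop_eq _ _ _ h, pvRowDesc, List.flatMap_cons]
    set f := (pvAYearRow (d.getD y PySem.Dict.empty)).reverse with hf
    set g := rest.flatMap (fun y => (pvAYearRow (d.getD y PySem.Dict.empty)).reverse) with hg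
    by_cases h1 : 12 ≤ buffer.length + f.length
    · rw [if_pos h1]
      simp only [if_true]
      rw [if_pos (show 12 ≤ buffer.length + (f ++ g).length by
            simp only [List.length_append]; omega)]
      rw [List.take_append_of_le_length (by omega)]
    · rw [if_neg h1]
      simp only [Bool.false_eq_true, if_false]
      have hlt : (buffer ++ f).length < 12 := by simp only [List.length_append]; omega
      rw [ih _ hlt]
      simp only [List.length_append]
      by_cases h2 : 12 ≤ buffer.length + f.length + g.length
      · rw [if_pos (by omega), if_pos (by omega)]
        rw [List.take_append,
          List.take_of_length_le (show f.length ≤ 12 - buffer.length by omega)]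
        have h3 : 12 - (buffer.length + f.length) = 12 - buffer.length - f.length := by omega
        rw [h3, List.append_assoc]
      · rw [if_neg (by omega), if_neg (by omega)]
        rw [List.append_assoc]

-- descending sorted keys are the reverse of ascending sorted keys (keys are distinct)
lemma pvSortedDesc (d : PySem.Dict Int (PySem.Dict Int Int)) (hnd : d.keys.Nodup) :
    PySem.List.sorted d.keys (fun y => y) true
      = (PySem.List.sorted d.keys (fun y => y) false).reverse := by
  apply PySem.List.sorted_rev_eq_of_perm_of_pairwise_gt
  · exact (List.reverse_perm _).trans (PySem.List.sorted_perm _ _ _)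
  · rw [List.pairwise_reverse]
    have hp := PySem.List.sorted_pairwise d.keys (fun y => y) (κ := Int)
    have hnd' : (PySem.List.sorted d.keys (fun y => y) false).Nodup :=
      ((PySem.List.sorted_perm d.keys (fun y => y) false).nodup_iff).mpr hnd
    have := List.Pairwise.and hp hnd'
    exact this.imp (by intro a b hab; rcases hab with ⟨h1, h2⟩; omega)

-- ===== VERDICT (by name: the statement is the Claim_ definition above) =====
-- both ports average the same multiset: B's buffer is the reverse of A's last-12 slice
theorem get_full_pension_amt_UPS_spec : Claim_equal_get_full_pension_amt_UPS := by
  intro msd _ _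
  unfold Spec_get_full_pension_amt_UPS get_full_pension_amt_UPS get_full_pension_amt_UPS_alt
  simp only
  set d : PySem.Dict Int (PySem.Dict Int Int) :=
    PySem.Dict.ofList (msd.map (fun p => (p.1, PySem.Dict.ofList p.2))) with hd
  set L := (PySem.List.sorted d.keys (fun y => y) false).flatMap
      (fun year => pvAYearRow (d.getD year PySem.Dict.empty)) with hL
  have hnd : d.keys.Nodup := PySem.Dict.nodup_keys_ofList _
  have hbuf : pvBYearLoop d (PySem.List.sorted d.keys (fun y => y) true) []
      = (PySem.List.slice L (some (-12)) none).reverse := by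
    rw [pvSortedDesc d hnd, pvBYearLoop_eq d _ [] (by simp), List.flatMap_reverse]
    simp only [Function.comp_def, List.reverse_reverse, List.length_nil, List.nil_append,
      Nat.zero_add, Nat.sub_zero, List.length_reverse]
    rw [← hL, PySem.List.slice_from_neg_ofNat L 12 (by omega)]
    by_cases h12 : 12 ≤ L.length
    · rw [if_pos h12, List.reverse_drop]
      congr 1
      omega
    · rw [if_neg h12]
      have h0 : L.length - 12 = 0 := by omega
      rw [h0, List.drop_zero]
  rw [hbuf]
  simp
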